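-- pv_equiv track=rewrite | github.com/hugger-beep/scp_tool | scp_tool.py | _analyze_action_impact
-- ===== SOURCE A (Python) =====
-- from typing import Dict, List, Any, Optional
--
-- def _analyze_action_impact(action: str) -> Optional[str]:
--     """Analyze the impact of denying a specific action"""
--     impact_map = {
--         'ec2:RunInstances': 'Cannot launch new EC2 instances',
--         'ec2:TerminateInstances': 'Cannot terminate EC2 instances',
--         's3:CreateBucket': 'Cannot create new S3 buckets',
--         's3:DeleteBucket': 'Cannot delete S3 buckets',
--         'iam:CreateUser': 'Cannot create new IAM users',
--         'iam:DeleteUser': 'Cannot delete IAM users',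
--         'rds:CreateDBInstance': 'Cannot create RDS instances',
--         'lambda:CreateFunction': 'Cannot create Lambda functions',
--         'cloudformation:CreateStack': 'Cannot create CloudFormation stacks',
--         'sts:AssumeRole': 'Cannot assume IAM roles (breaks cross-account access)',
--         'organizations:*': 'Blocks all Organizations operations',
--         'iam:*': 'Blocks all IAM operations (high risk)',
--         'ec2:*': 'Blocks all EC2 operations',
--         's3:*': 'Blocks all S3 operations'
--     }
--
--     # Direct match
--     if action in impact_map:
--         return impact_map[action]
--
--     # Wildcard match
--     for pattern, impact in impact_map.items():
--         if pattern.endswith('*') and action.startswith(pattern[:-1]):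
--             return impact
--
--     return None
-- ===== SOURCE B (Python) =====
-- from typing import Optional
--
-- def _analyze_action_impact(action: str) -> Optional[str]:
--     """Analyze the impact of denying a specific action"""
--     impact_map = {
--         'ec2:RunInstances': 'Cannot launch new EC2 instances',
--         'ec2:TerminateInstances': 'Cannot terminate EC2 instances',
--         's3:CreateBucket': 'Cannot create new S3 buckets',
--         's3:DeleteBucket': 'Cannot delete S3 buckets',
--         'iam:CreateUser': 'Cannot create new IAM users',
--         'iam:DeleteUser': 'Cannot delete IAM users',
--         'rds:CreateDBInstance': 'Cannot create RDS instances',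
--         'lambda:CreateFunction': 'Cannot create Lambda functions',
--         'cloudformation:CreateStack': 'Cannot create CloudFormation stacks',
--         'sts:AssumeRole': 'Cannot assume IAM roles (breaks cross-account access)',
--         'organizations:*': 'Blocks all Organizations operations',
--         'iam:*': 'Blocks all IAM operations (high risk)',
--         'ec2:*': 'Blocks all EC2 operations',
--         's3:*': 'Blocks all S3 operations'
--     }
--
--     # Direct match
--     if action in impact_map:
--         return impact_map[action]
--
--     # Wildcard match: every wildcard pattern is a service prefix followed by a star,
--     # so the only candidate key is derived from the action's service prefix.
--     i = action.find(':')
--     if i != -1: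
--         return impact_map.get(action[:i + 1] + '*')
--     return None
-- ===== Notes on version B (the rewrite author's own statement) =====
-- stated objective: idiomatic
-- what changed: The linear scan over all 14 patterns testing endswith/startswith is replaced by computing the single candidate wildcard key from the action's first colon and doing one dict lookup.
import Mathlib
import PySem

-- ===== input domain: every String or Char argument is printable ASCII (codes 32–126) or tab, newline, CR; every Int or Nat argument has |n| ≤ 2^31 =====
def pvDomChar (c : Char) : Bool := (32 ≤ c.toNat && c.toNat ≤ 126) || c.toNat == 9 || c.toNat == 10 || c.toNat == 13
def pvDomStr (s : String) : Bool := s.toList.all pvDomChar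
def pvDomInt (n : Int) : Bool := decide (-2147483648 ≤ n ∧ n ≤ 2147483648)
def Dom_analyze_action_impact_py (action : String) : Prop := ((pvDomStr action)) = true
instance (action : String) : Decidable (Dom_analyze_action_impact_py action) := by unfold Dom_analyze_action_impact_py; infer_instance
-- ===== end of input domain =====

-- B replaces A's scan over all patterns by computing the single candidate wildcard
-- key 'service:*' from the action's first colon and doing one dict lookup (idiomatic).

-- the dict literal (shared data table of both versions)
def pvImpactItems : List (String × String) :=
  [ ("ec2:RunInstances", "Cannot launch new EC2 instances"),
    ("ec2:TerminateInstances", "Cannot terminate EC2 instances"),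
    ("s3:CreateBucket", "Cannot create new S3 buckets"),
    ("s3:DeleteBucket", "Cannot delete S3 buckets"),
    ("iam:CreateUser", "Cannot create new IAM users"),
    ("iam:DeleteUser", "Cannot delete IAM users"),
    ("rds:CreateDBInstance", "Cannot create RDS instances"),
    ("lambda:CreateFunction", "Cannot create Lambda functions"),
    ("cloudformation:CreateStack", "Cannot create CloudFormation stacks"),
    ("sts:AssumeRole", "Cannot assume IAM roles (breaks cross-account access)"),
    ("organizations:*", "Blocks all Organizations operations"),
    ("iam:*", "Blocks all IAM operations (high risk)"),
    ("ec2:*", "Blocks all EC2 operations"),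
    ("s3:*", "Blocks all S3 operations") ]

-- ===== PORT A =====
-- `for pattern, impact in impact_map.items(): if pattern.endswith('*') and action.startswith(pattern[:-1]): return impact`
def pvWildScan (action : String) : List (String × String) → Option String
  | [] => none
  | (pattern, impact) :: rest =>
    if PySem.Str.endswith pattern "*" && PySem.Str.startswith action (PySem.Str.slice pattern none (some (-1))) then
      some impact
    else pvWildScan action rest

def analyze_action_impact_py (action : String) : Option String :=
  let impact_map := PySem.Dict.ofList pvImpactItems
  if impact_map.contains action then impact_map.get? action
  else pvWildScan action impact_map.items

-- ===== PORT B =====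
def analyze_action_impact_py_alt (action : String) : Option String :=
  let impact_map := PySem.Dict.ofList pvImpactItems
  if impact_map.contains action then impact_map.get? action
  else
    let i := PySem.Str.find action ":"
    if i ≠ -1 then impact_map.get? (PySem.Str.slice action none (some (i + 1)) ++ "*")
    else none

-- ===== PRECONDITION & SPEC =====
def Spec_analyze_action_impact_py (action : String) (out : Option String) : Prop := out = analyze_action_impact_py_alt action
instance (action : String) (out : Option String) : Decidable (Spec_analyze_action_impact_py action out) := by unfold Spec_analyze_action_impact_py; infer_instance

-- ===== CLAIM (what is proved, stated in full; the proofs are below) =====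
def Claim_equal_analyze_action_impact_py : Prop := ∀ (action : String), Dom_analyze_action_impact_py action → Spec_analyze_action_impact_py action (analyze_action_impact_py action)

-- ===== LEMMAS AND PROOFS =====

-- a singleton list is a prefix iff it is the head
theorem pv_singleton_prefix (a : Char) (xs : List Char) : [a] <+: xs ↔ xs.head? = some a := by
  cases xs with
  | nil => simp
  | cons y ys =>
    constructor
    · rintro ⟨t, ht⟩; simp at ht; simp [ht.1]
    · intro h; simp at h; exact ⟨ys, by simp [h]⟩

-- the first colon of a string starting with q++[':'] (':' ∉ q) sits exactly at |q|
theorem pv_prefix_colon_iff (l q : List Char) (hq : ':' ∉ q) :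
    ((q ++ [':']) <+: l) ↔
      (PySem.Chars.find l [':'] ≠ -1 ∧
       l.take ((PySem.Chars.find l [':']).toNat + 1) = q ++ [':']) := by
  constructor
  · rintro ⟨t, rfl⟩
    have hocc : [':'] <+: (q ++ [':'] ++ t).drop q.length := by
      simp
    have hfind0 : 0 ≤ PySem.Chars.find (q ++ [':'] ++ t) [':'] := by
      rw [PySem.Chars.find_nonneg_iff, ← PySem.Chars.isIn_iff_infix,
        ← PySem.Chars.exists_prefix_drop_iff_isIn]
      exact ⟨q.length, hocc⟩
    obtain ⟨hpref, hmin⟩ := PySem.Chars.find_spec hfind0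
    set k := (PySem.Chars.find (q ++ [':'] ++ t) [':']).toNat with hk
    have hle : k ≤ q.length := by
      by_contra hgt
      exact hmin q.length (by omega) hocc
    have hge : q.length ≤ k := by
      by_contra hlt
      rw [not_le] at hlt
      rw [pv_singleton_prefix] at hpref
      rw [List.head?_drop] at hpref
      have : (q ++ [':'] ++ t)[k]? = q[k]? := by
        rw [List.append_assoc, List.getElem?_append_left hlt]
      rw [this] at hpref
      exact hq (List.mem_of_getElem? hpref)
    have hkq : k = q.length := le_antisymm hle hge
    refine ⟨by omega, ?_⟩
    rw [hkq, List.append_assoc, List.take_append]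
    simp
  · rintro ⟨-, htake⟩
    exact htake ▸ List.take_prefix _ _
-- note: `find ≠ -1 ∧ 0 ≤ find` interplay: find ≥ -1 always, so ≠ -1 ↔ 0 ≤.

theorem pv_find_nonneg_of_ne (l : List Char) (h : PySem.Chars.find l [':'] ≠ -1) :
    0 ≤ PySem.Chars.find l [':'] := by
  have := PySem.Chars.neg_one_le_find l [':']
  omega

-- a list ending in '*' never equals a star-free list
theorem pv_append_star_ne (xs ys : List Char) (h : '*' ∉ ys) : xs ++ ['*'] ≠ ys := by
  intro he
  exact h (he ▸ (by simp : '*' ∈ xs ++ ['*']))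


-- A's scan, with the 10 non-wildcard entries decided away
theorem pv_scan_eq (action : String) :
    pvWildScan action pvImpactItems =
    (  if PySem.Str.startswith action "organizations:" then some "Blocks all Organizations operations"
  else if PySem.Str.startswith action "iam:" then some "Blocks all IAM operations (high risk)"
  else if PySem.Str.startswith action "ec2:" then some "Blocks all EC2 operations"
  else if PySem.Str.startswith action "s3:" then some "Blocks all S3 operations"
  else none) := by
  simp only [pvImpactItems, pvWildScan,
    show PySem.Str.endswith "ec2:RunInstances" "*" = false from by decide,
    show PySem.Str.endswith "ec2:TerminateInstances" "*" = false from by decide,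
    show PySem.Str.endswith "s3:CreateBucket" "*" = false from by decide,
    show PySem.Str.endswith "s3:DeleteBucket" "*" = false from by decide,
    show PySem.Str.endswith "iam:CreateUser" "*" = false from by decide,
    show PySem.Str.endswith "iam:DeleteUser" "*" = false from by decide,
    show PySem.Str.endswith "rds:CreateDBInstance" "*" = false from by decide,
    show PySem.Str.endswith "lambda:CreateFunction" "*" = false from by decide,
    show PySem.Str.endswith "cloudformation:CreateStack" "*" = false from by decide,
    show PySem.Str.endswith "sts:AssumeRole" "*" = false from by decide,
    show PySem.Str.endswith "organizations:*" "*" = true from by decide,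
    show PySem.Str.endswith "iam:*" "*" = true from by decide,
    show PySem.Str.endswith "ec2:*" "*" = true from by decide,
    show PySem.Str.endswith "s3:*" "*" = true from by decide,
    show PySem.Str.slice "organizations:*" none (some (-1)) = "organizations:" from by decide,
    show PySem.Str.slice "iam:*" none (some (-1)) = "iam:" from by decide,
    show PySem.Str.slice "ec2:*" none (some (-1)) = "ec2:" from by decide,
    show PySem.Str.slice "s3:*" none (some (-1)) = "s3:" from by decide,
    Bool.false_and, Bool.true_and, if_false, Bool.false_eq_true]

-- startswith 'service:' characterised by the first colon of the action
theorem pv_sw_iff (action : String) (q qc : String) (hqc : qc.toList = q.toList ++ [':'])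
    (hq : ':' ∉ q.toList) :
    PySem.Str.startswith action qc = true ↔
      (PySem.Str.find action ":" ≠ -1 ∧
       action.toList.take ((PySem.Str.find action ":").toNat + 1) = qc.toList) := by
  rw [PySem.Str.startswith_eq, PySem.Chars.startswith_iff, hqc, PySem.Str.find_eq]
  exact pv_prefix_colon_iff action.toList q.toList hq

-- B's candidate key never equals a star-free dict key
theorem pv_key_ne (action : String) (w : String) (hw : '*' ∉ w.toList)
    (h : PySem.Str.slice action none (some (PySem.Str.find action ":" + 1)) ++ "*" = w) : False := by
  apply pv_append_star_ne ((PySem.Str.slice action none (some (PySem.Str.find action ":" + 1))).toList) w.toList hw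
  simpa using congrArg String.toList h

-- B's candidate key equals 'service:*' iff the action's first-colon prefix is 'service:'
theorem pv_key_iff (action : String) (qc w : String) (hw : w.toList = qc.toList ++ ['*'])
    (hf : PySem.Str.find action ":" ≠ -1) :
    (PySem.Str.slice action none (some (PySem.Str.find action ":" + 1)) ++ "*" = w) ↔
      action.toList.take ((PySem.Str.find action ":").toNat + 1) = qc.toList := by
  have h0 : 0 ≤ PySem.Str.find action ":" := by
    rw [PySem.Str.find_eq] at hf ⊢; exact pv_find_nonneg_of_ne _ hf
  rw [← String.toList_inj, String.toList_append, PySem.Str.toList_slice,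
    PySem.Chars.slice_eq_listSlice, hw]
  have hs : PySem.List.slice action.toList none (some (PySem.Str.find action ":" + 1)) =
      List.take ((PySem.Str.find action ":").toNat + 1) action.toList := by
    rw [PySem.List.slice_to _ (by omega)]
    congr 1
    omega
  have hstar : ("*" : String).toList = ['*'] := by simp
  rw [hs, hstar]
  constructor
  · intro h; exact List.append_inj_left' h (by simp)
  · intro h; rw [h]

-- B's residual lookup, with the 10 non-wildcard entries pruned
theorem pv_lookup_eq (action : String) (hf : PySem.Str.find action ":" ≠ -1) :
    (PySem.Dict.ofList pvImpactItems).get?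
        (PySem.Str.slice action none (some (PySem.Str.find action ":" + 1)) ++ "*") =
    (  if action.toList.take ((PySem.Str.find action ":").toNat + 1) = "organizations:".toList then some "Blocks all Organizations operations"
  else if action.toList.take ((PySem.Str.find action ":").toNat + 1) = "iam:".toList then some "Blocks all IAM operations (high risk)"
  else if action.toList.take ((PySem.Str.find action ":").toNat + 1) = "ec2:".toList then some "Blocks all EC2 operations"
  else if action.toList.take ((PySem.Str.find action ":").toNat + 1) = "s3:".toList then some "Blocks all S3 operations"
  else none) := by
  have hd : PySem.Dict.ofList pvImpactItems = PySem.Dict.mk pvImpactItems := by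
    apply PySem.Dict.ext; decide
  have hne0 : ("ec2:RunInstances" == PySem.Str.slice action none (some (PySem.Str.find action ":" + 1)) ++ "*") = false := by
    rw [beq_eq_false_iff_ne]
    exact fun h => pv_key_ne action "ec2:RunInstances" (by decide) h.symm

  have hne1 : ("ec2:TerminateInstances" == PySem.Str.slice action none (some (PySem.Str.find action ":" + 1)) ++ "*") = false := by
    rw [beq_eq_false_iff_ne]
    exact fun h => pv_key_ne action "ec2:TerminateInstances" (by decide) h.symm

  have hne2 : ("s3:CreateBucket" == PySem.Str.slice action none (some (PySem.Str.find action ":" + 1)) ++ "*") = false := by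
    rw [beq_eq_false_iff_ne]
    exact fun h => pv_key_ne action "s3:CreateBucket" (by decide) h.symm

  have hne3 : ("s3:DeleteBucket" == PySem.Str.slice action none (some (PySem.Str.find action ":" + 1)) ++ "*") = false := by
    rw [beq_eq_false_iff_ne]
    exact fun h => pv_key_ne action "s3:DeleteBucket" (by decide) h.symm

  have hne4 : ("iam:CreateUser" == PySem.Str.slice action none (some (PySem.Str.find action ":" + 1)) ++ "*") = false := by
    rw [beq_eq_false_iff_ne]
    exact fun h => pv_key_ne action "iam:CreateUser" (by decide) h.symm

  have hne5 : ("iam:DeleteUser" == PySem.Str.slice action none (some (PySem.Str.find action ":" + 1)) ++ "*") = false := by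
    rw [beq_eq_false_iff_ne]
    exact fun h => pv_key_ne action "iam:DeleteUser" (by decide) h.symm

  have hne6 : ("rds:CreateDBInstance" == PySem.Str.slice action none (some (PySem.Str.find action ":" + 1)) ++ "*") = false := by
    rw [beq_eq_false_iff_ne]
    exact fun h => pv_key_ne action "rds:CreateDBInstance" (by decide) h.symm

  have hne7 : ("lambda:CreateFunction" == PySem.Str.slice action none (some (PySem.Str.find action ":" + 1)) ++ "*") = false := by
    rw [beq_eq_false_iff_ne]
    exact fun h => pv_key_ne action "lambda:CreateFunction" (by decide) h.symm

  have hne8 : ("cloudformation:CreateStack" == PySem.Str.slice action none (some (PySem.Str.find action ":" + 1)) ++ "*") = false := by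
    rw [beq_eq_false_iff_ne]
    exact fun h => pv_key_ne action "cloudformation:CreateStack" (by decide) h.symm

  have hne9 : ("sts:AssumeRole" == PySem.Str.slice action none (some (PySem.Str.find action ":" + 1)) ++ "*") = false := by
    rw [beq_eq_false_iff_ne]
    exact fun h => pv_key_ne action "sts:AssumeRole" (by decide) h.symm

  have hw0 := pv_key_iff action "organizations:" "organizations:*" (by decide) hf
  have hw1 := pv_key_iff action "iam:" "iam:*" (by decide) hf
  have hw2 := pv_key_iff action "ec2:" "ec2:*" (by decide) hf
  have hw3 := pv_key_iff action "s3:" "s3:*" (by decide) hf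
  rw [hd]
  simp only [pvImpactItems, PySem.Dict.get?_mk_cons, hne0, hne1, hne2, hne3, hne4, hne5,
    hne6, hne7, hne8, hne9, Bool.false_eq_true, if_false, beq_iff_eq,
    eq_comm.trans hw0, eq_comm.trans hw1, eq_comm.trans hw2, eq_comm.trans hw3,
    show ∀ x : String, (PySem.Dict.mk ([] : List (String × String))).get? x = none from fun _ => rfl]

-- the two residuals agree
theorem pv_residual_eq (action : String) :
    pvWildScan action pvImpactItems =
    (if PySem.Str.find action ":" ≠ -1 then
        (PySem.Dict.ofList pvImpactItems).get?
          (PySem.Str.slice action none (some (PySem.Str.find action ":" + 1)) ++ "*")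
      else none) := by
  have hs0 := pv_sw_iff action "organizations" "organizations:" (by decide) (by decide)
  have hs1 := pv_sw_iff action "iam" "iam:" (by decide) (by decide)
  have hs2 := pv_sw_iff action "ec2" "ec2:" (by decide) (by decide)
  have hs3 := pv_sw_iff action "s3" "s3:" (by decide) (by decide)
  by_cases hf : PySem.Str.find action ":" = -1
  · rw [pv_scan_eq]
    simp only [hf, ne_eq, not_true_eq_false, if_false]
    have f0 : PySem.Str.startswith action "organizations:" = false := by
      rw [← Bool.not_eq_true]; intro h; exact (hs0.mp h).1 hf
    have f1 : PySem.Str.startswith action "iam:" = false := by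
      rw [← Bool.not_eq_true]; intro h; exact (hs1.mp h).1 hf
    have f2 : PySem.Str.startswith action "ec2:" = false := by
      rw [← Bool.not_eq_true]; intro h; exact (hs2.mp h).1 hf
    have f3 : PySem.Str.startswith action "s3:" = false := by
      rw [← Bool.not_eq_true]; intro h; exact (hs3.mp h).1 hf
    simp only [f0, f1, f2, f3, Bool.false_eq_true, if_false]
  · rw [pv_scan_eq, pv_lookup_eq action hf, if_pos hf]
    simp only [hf, ne_eq, not_false_iff, true_and] at hs0 hs1 hs2 hs3
    simp only [hs0, hs1, hs2, hs3]

-- ===== VERDICT (by name: the statement is the Claim_ definition above) =====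
theorem analyze_action_impact_py_spec : Claim_equal_analyze_action_impact_py := by
  intro action _
  unfold Spec_analyze_action_impact_py analyze_action_impact_py analyze_action_impact_py_alt
  simp only []
  by_cases hc : (PySem.Dict.ofList pvImpactItems).contains action = true
  · simp [hc]
  · simp only [Bool.not_eq_true] at hc
    simp only [hc, Bool.false_eq_true, if_false]
    have hitems : (PySem.Dict.ofList pvImpactItems).items = pvImpactItems := by decide
    rw [hitems, pv_residual_eq]
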